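-- pv_equiv track=rewrite | github.com/Dorocy/AAS-Repository-Hub | backend/tools/stringTool.py | valueValidationFalse
-- ===== SOURCE A (Python) =====
-- def valueValidationFalse(value):
--     query_list = value.replace(" ", "").split(';')
--
--     prohibited_keywords = ['allprivileges', 'grant', 'revoke', 'excecute', 'insert', 'insertinto', 'truncate', 'upsert', 'mergeinto', 'delete', 'create', 'drop', 'update', 'create', 'alter', 'deletefrom', 'truncatetable', 'dropdatabase', 'dropschema', 'merge']
--
--     for query in query_list:
--         for keyword in prohibited_keywords:
--             if query.lower().startswith(keyword):
--                 return True
--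
--     if value.find(";") == -1:
--         return False
--     else:
--         return True
-- ===== SOURCE B (Python) =====
-- def valueValidationFalse(value):
--     prohibited_keywords = ['allprivileges', 'grant', 'revoke', 'excecute', 'insert', 'insertinto', 'truncate', 'upsert', 'mergeinto', 'delete', 'create', 'drop', 'update', 'create', 'alter', 'deletefrom', 'truncatetable', 'dropdatabase', 'dropschema', 'merge']
--
--     if ';' in value:
--         return True
--     cleaned = value.replace(' ', '')
--     return cleaned.lower().startswith(tuple(prohibited_keywords))
-- ===== Notes on version B (the rewrite author's own statement) =====
-- stated objective: simpler
-- what changed: Replaces the split-into-segments nested loop over keywords with a single guarded prefix test: any semicolon means True immediately, and with no semicolon the space-stripped string is the only segment, so one startswith(tuple(keywords)) suffices.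
import Mathlib
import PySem

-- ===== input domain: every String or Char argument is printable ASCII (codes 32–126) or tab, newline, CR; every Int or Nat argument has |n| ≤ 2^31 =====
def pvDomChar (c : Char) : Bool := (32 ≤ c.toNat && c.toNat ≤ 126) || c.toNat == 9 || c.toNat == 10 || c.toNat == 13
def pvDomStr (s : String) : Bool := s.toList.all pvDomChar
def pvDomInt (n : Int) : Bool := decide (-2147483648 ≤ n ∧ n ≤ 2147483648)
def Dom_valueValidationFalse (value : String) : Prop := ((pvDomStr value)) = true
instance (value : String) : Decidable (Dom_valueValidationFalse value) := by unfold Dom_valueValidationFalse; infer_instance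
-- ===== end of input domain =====

-- B replaces A's split-into-segments nested loop by a single guarded prefix test
-- (semicolon ⇒ True, else one startswith over the keyword list); objective: simpler.

-- ===== PORT A =====
def pvProhibitedKeywords : List String :=
  ["allprivileges", "grant", "revoke", "excecute", "insert", "insertinto", "truncate",
   "upsert", "mergeinto", "delete", "create", "drop", "update", "create", "alter",
   "deletefrom", "truncatetable", "dropdatabase", "dropschema", "merge"]

-- A: split the space-stripped string on ';', scan every segment against every keyword
-- (the nested for with early 'return True' is the any-of-any), then the find(";") check.
def valueValidationFalse (value : String) : Bool :=
  let queryList := (PySem.Str.split? (PySem.Str.replace value " " "") ";").getD []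
  if queryList.any (fun query =>
      pvProhibitedKeywords.any (fun keyword =>
        PySem.Str.startswith (PySem.Str.lower query) keyword)) then
    true
  else if PySem.Str.find value ";" = -1 then false else true

-- ===== PORT B =====
-- B: ';' present ⇒ True; otherwise one prefix test of the lowered space-stripped
-- string against the keyword tuple (startswith(tuple) = any of startswith).
def valueValidationFalse_alt (value : String) : Bool :=
  if PySem.Str.isIn ";" value then true
  else
    let cleanedLower := PySem.Str.lower (PySem.Str.replace value " " "")
    pvProhibitedKeywords.any (fun keyword => PySem.Str.startswith cleanedLower keyword)

-- ===== PRECONDITION & SPEC =====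
def Spec_valueValidationFalse (value : String) (out : Bool) : Prop := out = valueValidationFalse_alt value
instance (value : String) (out : Bool) : Decidable (Spec_valueValidationFalse value out) := by unfold Spec_valueValidationFalse; infer_instance

-- ===== CLAIM (what is proved, stated in full; the proofs are below) =====
def Claim_equal_valueValidationFalse : Prop := ∀ (value : String), Dom_valueValidationFalse value → Spec_valueValidationFalse value (valueValidationFalse value)

-- ===== LEMMAS AND PROOFS =====

-- splitting on ';' when no ';' occurs yields the single whole segment
theorem splitOn_go_no_semi (fuel : Nat) (l cur : List Char) (acc : List (List Char))
    (h : ';' ∉ l) :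
    PySem.Chars.splitOn.go [';'] fuel l cur acc = ((cur.reverse ++ l) :: acc).reverse := by
  induction fuel generalizing l cur acc with
  | zero => simp [PySem.Chars.splitOn.go]
  | succ n ih =>
    cases l with
    | nil => simp [PySem.Chars.splitOn.go]
    | cons c rest =>
      have hc : c ≠ ';' := fun he => h (he ▸ List.mem_cons_self)
      have hpre : [';'].isPrefixOf (c :: rest) = false := by
        simp [List.isPrefixOf]; exact fun he => absurd he.symm hc
      rw [PySem.Chars.splitOn.go, hpre]
      simp only [Bool.false_eq_true, if_false]
      rw [ih rest (c :: cur) acc (fun hm => h (List.mem_cons_of_mem _ hm))]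
      simp

theorem splitOn_no_semi (l : List Char) (h : ';' ∉ l) :
    PySem.Chars.splitOn l [';'] = [l] := by
  rw [PySem.Chars.splitOn, splitOn_go_no_semi _ _ _ _ h]
  simp

-- removing spaces cannot introduce a character
theorem mem_replace_go (fuel : Nat) (l acc : List Char) (x : Char)
    (h : x ∈ PySem.Chars.replace.go [' '] [] fuel l acc) : x ∈ l ∨ x ∈ acc := by
  induction fuel generalizing l acc with
  | zero =>
    simp [PySem.Chars.replace.go] at h
    tauto
  | succ n ih =>
    cases l with
    | nil =>
      simp [PySem.Chars.replace.go] at h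
      exact Or.inr h
    | cons c rest =>
      rw [PySem.Chars.replace.go] at h
      by_cases hp : [' '].isPrefixOf (c :: rest) = true
      · rw [if_pos hp] at h
        simp only [List.reverse_nil, List.nil_append] at h
        rcases ih _ _ h with h1 | h1
        · exact Or.inl (List.mem_cons_of_mem _ h1)
        · exact Or.inr h1
      · rw [if_neg hp] at h
        rcases ih _ _ h with h1 | h1
        · exact Or.inl (List.mem_cons_of_mem _ h1)
        · rcases List.mem_cons.mp h1 with h2 | h2
          · exact Or.inl (h2 ▸ List.mem_cons_self)
          · exact Or.inr h2

theorem mem_replace_space (l : List Char) (x : Char)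
    (h : x ∈ PySem.Chars.replace l [' '] []) : x ∈ l := by
  rw [PySem.Chars.replace] at h
  simp only [List.isEmpty_cons, Bool.false_eq_true, if_false] at h
  rcases mem_replace_go _ _ _ _ h with h1 | h1
  · exact h1
  · simp at h1

-- ===== VERDICT (by name: the statement is the Claim_ definition above) =====
theorem valueValidationFalse_spec : Claim_equal_valueValidationFalse := by
  intro value _
  unfold Spec_valueValidationFalse valueValidationFalse valueValidationFalse_alt
  by_cases h : ';' ∈ value.toList
  · have hfind : ¬ PySem.Str.find value ";" = -1 := by
      rw [PySem.Str.find_eq_neg_one_iff]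
      intro hn
      exact hn (by simpa using (List.singleton_infix_iff ';' value.toList).mpr h)
    have hisin : PySem.Str.isIn ";" value = true := by
      rw [PySem.Str.isIn_iff_infix]
      simpa using (List.singleton_infix_iff ';' value.toList).mpr h
    simp only [hisin, if_true, hfind, if_false]
    split_ifs <;> rfl
  · have hfind : PySem.Str.find value ";" = -1 := by
      rw [PySem.Str.find_eq_neg_one_iff]
      intro hn
      exact h ((List.singleton_infix_iff ';' value.toList).mp (by simpa using hn))
    have hisin : PySem.Str.isIn ";" value = false := by
      rw [Bool.eq_false_iff]
      intro hn
      exact h ((List.singleton_infix_iff ';' value.toList).mp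
        (by simpa using (PySem.Str.isIn_iff_infix ";" value).mp hn))
    have hclean : ';' ∉ (PySem.Str.replace value " " "").toList := by
      rw [PySem.Str.toList_replace]
      intro hm
      exact h (mem_replace_space _ _ (by simpa using hm))
    have hsplit : (PySem.Str.split? (PySem.Str.replace value " " "") ";").getD []
        = [PySem.Str.replace value " " ""] := by
      rw [PySem.Str.split?.eq_1, PySem.Chars.split?.eq_1,
          show (";" : String).toList = [';'] from rfl]
      simp only [List.isEmpty_cons, Bool.false_eq_true, if_false, Option.map_some, Option.getD_some]
      rw [splitOn_no_semi _ hclean]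
      simp only [List.map_cons, List.map_nil, String.ofList_toList]
    simp only [hsplit, hisin, hfind, if_true, if_false, Bool.false_eq_true, List.any_cons, List.any_nil, Bool.or_false]
    split_ifs with hany
    · exact hany.symm
    · exact (Bool.eq_false_iff.mpr hany).symm
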